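-- pv_equiv track=rewrite | github.com/Baburaj8095/trikonekt-marketing | backend/locations/views.py | india_place_variants
-- ===== SOURCE A (Python) =====
-- def india_place_variants(name: str):
--     if not name:
--         return []
--     base = str(name).strip()
--     variants = {base, base.title(), base.upper()}
--     # Known India synonym mappings (modern <-> legacy)
--     synonyms = {
--         "Kalaburagi": ["Gulbarga"],
--         "Kalaburgi": ["Kalaburagi", "Gulbarga"],
--         "Belagavi": ["Belgaum"],
--         "Vijayapura": ["Bijapur"],
--         "Ballari": ["Bellary"],
--         "Shivamogga": ["Shimoga"],
--         "Tumakuru": ["Tumkur"],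
--         "Chikkamagaluru": ["Chikmagalur"],
--         "Mysuru": ["Mysore"],
--         "Bengaluru": ["Bangalore"],
--         "Bengaluru Urban": ["Bangalore Urban"],
--         "Bengaluru Rural": ["Bangalore Rural"],
--         "Kalyana Karnataka": ["Hyderabad Karnataka"],
--     }
--     for modern, olds in synonyms.items():
--         if base.lower() == modern.lower():
--             for o in olds:
--                 variants.update({o, o.title(), o.upper()})
--         for o in olds:
--             if base.lower() == o.lower():
--                 variants.update({modern, modern.title(), modern.upper()})
--     return list(variants)
-- ===== SOURCE B (Python) =====
-- def india_place_variants(name: str):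
--     if not name:
--         return []
--     base = str(name).strip()
--     synonyms = {
--         "Kalaburagi": ["Gulbarga"],
--         "Kalaburgi": ["Kalaburagi", "Gulbarga"],
--         "Belagavi": ["Belgaum"],
--         "Vijayapura": ["Bijapur"],
--         "Ballari": ["Bellary"],
--         "Shivamogga": ["Shimoga"],
--         "Tumakuru": ["Tumkur"],
--         "Chikkamagaluru": ["Chikmagalur"],
--         "Mysuru": ["Mysore"],
--         "Bengaluru": ["Bangalore"],
--         "Bengaluru Urban": ["Bangalore Urban"],
--         "Bengaluru Rural": ["Bangalore Rural"],
--         "Kalyana Karnataka": ["Hyderabad Karnataka"],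
--     }
--     # bidirectional adjacency index keyed by lowercase name, built once
--     index = {}
--     for modern, olds in synonyms.items():
--         index.setdefault(modern.lower(), []).extend(olds)
--         for o in olds:
--             index.setdefault(o.lower(), []).append(modern)
--     variants = {base, base.title(), base.upper()}
--     for n in index.get(base.lower(), []):
--         variants.update({n, n.title(), n.upper()})
--     return list(variants)
-- ===== Notes on version B (the rewrite author's own statement) =====
-- stated objective: alternative
-- what changed: B builds a bidirectional lowercase-keyed adjacency index from the synonym map once and expands the name via a single dictionary lookup, instead of A's per-call scan over every (modern, olds) pair with case-insensitive comparisons in both directions.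
import Mathlib
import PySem

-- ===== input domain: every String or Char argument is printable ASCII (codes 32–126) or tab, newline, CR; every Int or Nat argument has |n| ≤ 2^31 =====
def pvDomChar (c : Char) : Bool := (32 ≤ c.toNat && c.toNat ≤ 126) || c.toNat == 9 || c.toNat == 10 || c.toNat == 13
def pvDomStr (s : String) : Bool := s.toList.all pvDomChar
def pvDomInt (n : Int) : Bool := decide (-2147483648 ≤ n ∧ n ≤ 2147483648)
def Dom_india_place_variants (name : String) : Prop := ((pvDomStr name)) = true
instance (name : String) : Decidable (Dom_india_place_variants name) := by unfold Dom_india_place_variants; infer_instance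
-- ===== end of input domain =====

-- B replaces A's per-call scan over every synonym pair by a bidirectional lowercase-keyed
-- adjacency index and a single dictionary lookup (objective: alternative decomposition; the
-- returned list is CPython set-iteration order in both Pythons and is compared as a set).

-- ===== PORT A =====
-- Python str.title(): uppercase a letter after a non-letter, lowercase a letter after a letter
-- (exact on the ASCII domain; PySem has no title primitive, so it is ported by hand here).
def pvTitleChars : List Char → Bool → List Char
  | [], _ => []
  | c :: cs, prevAlpha =>
    (if PySem.Chars.isalpha c then
        (if prevAlpha then PySem.Chars.lowerChar c else PySem.Chars.upperChar c)
      else c) :: pvTitleChars cs (PySem.Chars.isalpha c)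

def pvTitle (s : String) : String := String.ofList (pvTitleChars s.toList false)

def pvSynonyms : List (String × List String) := [("Kalaburagi", ["Gulbarga"]), ("Kalaburgi", ["Kalaburagi", "Gulbarga"]), ("Belagavi", ["Belgaum"]), ("Vijayapura", ["Bijapur"]), ("Ballari", ["Bellary"]), ("Shivamogga", ["Shimoga"]), ("Tumakuru", ["Tumkur"]), ("Chikkamagaluru", ["Chikmagalur"]), ("Mysuru", ["Mysore"]), ("Bengaluru", ["Bangalore"]), ("Bengaluru Urban", ["Bangalore Urban"]), ("Bengaluru Rural", ["Bangalore Rural"]), ("Kalyana Karnataka", ["Hyderabad Karnataka"])]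

def india_place_variants (name : String) : List String :=
  if name == "" then []
  else
    let base := PySem.Str.strip name
    let variants : PySem.Set String :=
      PySem.Set.ofList [base, pvTitle base, PySem.Str.upper base]
    pvSynonyms.foldl (fun variants mo =>
      List.foldl (fun v o =>
          if PySem.Str.lower base == PySem.Str.lower o then
            PySem.Set.update v [mo.1, pvTitle mo.1, PySem.Str.upper mo.1]
          else v)
        (if PySem.Str.lower base == PySem.Str.lower mo.1 then
            List.foldl (fun v o => PySem.Set.update v [o, pvTitle o, PySem.Str.upper o]) variants mo.2
          else variants)
        mo.2) variants

-- ===== PORT B =====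
-- the bidirectional adjacency index Source B builds once: for each (modern, olds) pair append the
-- olds under modern.lower() and modern under each o.lower()
def pvIndex : PySem.Dict String (List String) :=
  pvSynonyms.foldl (fun d mo =>
    List.foldl (fun d o =>
        d.insert (PySem.Str.lower o) (d.getD (PySem.Str.lower o) [] ++ [mo.1]))
      (d.insert (PySem.Str.lower mo.1) (d.getD (PySem.Str.lower mo.1) [] ++ mo.2))
      mo.2) PySem.Dict.empty

def india_place_variants_alt (name : String) : List String :=
  if name == "" then []
  else
    let base := PySem.Str.strip name
    let variants : PySem.Set String :=
      PySem.Set.ofList [base, pvTitle base, PySem.Str.upper base]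
    List.foldl (fun v n => PySem.Set.update v [n, pvTitle n, PySem.Str.upper n]) variants
      (PySem.Dict.getD pvIndex (PySem.Str.lower base) [])

-- ===== PRECONDITION & SPEC =====
def Spec_india_place_variants (name : String) (out : List String) : Prop := out = india_place_variants_alt name
instance (name : String) (out : List String) : Decidable (Spec_india_place_variants name out) := by unfold Spec_india_place_variants; infer_instance

-- ===== CLAIM (what is proved, stated in full; the proofs are below) =====
def Claim_equal_india_place_variants : Prop := ∀ (name : String), Dom_india_place_variants name → Spec_india_place_variants name (india_place_variants name)

-- ===== LEMMAS AND PROOFS =====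

-- the names A's scan adds for query k, as a flat list in A's addition order
def pvNb (k : String) : List (String × List String) → List String
  | [] => []
  | mo :: rest =>
      (if k == PySem.Str.lower mo.1 then mo.2 else [])
        ++ (mo.2.filter (fun o => k == PySem.Str.lower o)).map (fun _ => mo.1)
        ++ pvNb k rest

lemma pv_foldl_if_cond {α β : Type} (c : Prop) [Decidable c] (f : α → β → α) (l : List β) (v : α) :
    (if c then List.foldl f v l else v) = List.foldl f v (if c then l else []) := by
  split <;> rfl

lemma pv_foldl_guard {α β : Type} (f : α → β → α) (m : β) (p : β → Bool) (l : List β) (v : α) :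
    List.foldl (fun v o => if p o then f v m else v) v l
      = List.foldl f v ((l.filter p).map (fun _ => m)) := by
  induction l generalizing v with
  | nil => rfl
  | cons o t ih => by_cases hp : p o <;> simp [hp, ih]

-- A's scan over the entries is the flat fold over pvNb
lemma pv_scan_eq (k : String) (f : PySem.Set String → String → PySem.Set String)
    (entries : List (String × List String)) (v : PySem.Set String) :
    entries.foldl (fun variants mo =>
      List.foldl (fun v o => if k == PySem.Str.lower o then f v mo.1 else v)
        (if k == PySem.Str.lower mo.1 then List.foldl f variants mo.2 else variants)
        mo.2) v
      = List.foldl f v (pvNb k entries) := by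
  induction entries generalizing v with
  | nil => rfl
  | cons mo rest ih =>
      rw [List.foldl_cons, ih]
      simp only [pvNb, List.foldl_append]
      congr 1
      rw [pv_foldl_guard, pv_foldl_if_cond]

-- the scan's neighbour list is exactly B's lookup in the bidirectional index
set_option maxHeartbeats 4000000 in
lemma pvNb_eq_lookup (k : String) :
    pvNb k pvSynonyms = PySem.Dict.getD pvIndex k [] := by
  by_cases h1 : k = "kalaburagi"
  · subst h1; decide
  by_cases h2 : k = "gulbarga"
  · subst h2; decide
  by_cases h3 : k = "kalaburgi"
  · subst h3; decide
  by_cases h4 : k = "belagavi"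
  · subst h4; decide
  by_cases h5 : k = "belgaum"
  · subst h5; decide
  by_cases h6 : k = "vijayapura"
  · subst h6; decide
  by_cases h7 : k = "bijapur"
  · subst h7; decide
  by_cases h8 : k = "ballari"
  · subst h8; decide
  by_cases h9 : k = "bellary"
  · subst h9; decide
  by_cases h10 : k = "shivamogga"
  · subst h10; decide
  by_cases h11 : k = "shimoga"
  · subst h11; decide
  by_cases h12 : k = "tumakuru"
  · subst h12; decide
  by_cases h13 : k = "tumkur"
  · subst h13; decide
  by_cases h14 : k = "chikkamagaluru"
  · subst h14; decide
  by_cases h15 : k = "chikmagalur"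
  · subst h15; decide
  by_cases h16 : k = "mysuru"
  · subst h16; decide
  by_cases h17 : k = "mysore"
  · subst h17; decide
  by_cases h18 : k = "bengaluru"
  · subst h18; decide
  by_cases h19 : k = "bangalore"
  · subst h19; decide
  by_cases h20 : k = "bengaluru urban"
  · subst h20; decide
  by_cases h21 : k = "bangalore urban"
  · subst h21; decide
  by_cases h22 : k = "bengaluru rural"
  · subst h22; decide
  by_cases h23 : k = "bangalore rural"
  · subst h23; decide
  by_cases h24 : k = "kalyana karnataka"
  · subst h24; decide
  by_cases h25 : k = "hyderabad karnataka"
  · subst h25; decide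
  have hidx : pvIndex = PySem.Dict.mk [("kalaburagi", ["Gulbarga", "Kalaburgi"]), ("gulbarga", ["Kalaburagi", "Kalaburgi"]), ("kalaburgi", ["Kalaburagi", "Gulbarga"]), ("belagavi", ["Belgaum"]), ("belgaum", ["Belagavi"]), ("vijayapura", ["Bijapur"]), ("bijapur", ["Vijayapura"]), ("ballari", ["Bellary"]), ("bellary", ["Ballari"]), ("shivamogga", ["Shimoga"]), ("shimoga", ["Shivamogga"]), ("tumakuru", ["Tumkur"]), ("tumkur", ["Tumakuru"]), ("chikkamagaluru", ["Chikmagalur"]), ("chikmagalur", ["Chikkamagaluru"]), ("mysuru", ["Mysore"]), ("mysore", ["Mysuru"]), ("bengaluru", ["Bangalore"]), ("bangalore", ["Bengaluru"]), ("bengaluru urban", ["Bangalore Urban"]), ("bangalore urban", ["Bengaluru Urban"]), ("bengaluru rural", ["Bangalore Rural"]), ("bangalore rural", ["Bengaluru Rural"]), ("kalyana karnataka", ["Hyderabad Karnataka"]), ("hyderabad karnataka", ["Kalyana Karnataka"])] := by decide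
  rw [hidx]
  simp [pvNb, pvSynonyms, PySem.Dict.getD, PySem.Dict.get?_mk_cons,
    show PySem.Str.lower "Ballari" = "ballari" from by decide,
    show PySem.Str.lower "Bangalore" = "bangalore" from by decide,
    show PySem.Str.lower "Bangalore Rural" = "bangalore rural" from by decide,
    show PySem.Str.lower "Bangalore Urban" = "bangalore urban" from by decide,
    show PySem.Str.lower "Belagavi" = "belagavi" from by decide,
    show PySem.Str.lower "Belgaum" = "belgaum" from by decide,
    show PySem.Str.lower "Bellary" = "bellary" from by decide,
    show PySem.Str.lower "Bengaluru" = "bengaluru" from by decide,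
    show PySem.Str.lower "Bengaluru Rural" = "bengaluru rural" from by decide,
    show PySem.Str.lower "Bengaluru Urban" = "bengaluru urban" from by decide,
    show PySem.Str.lower "Bijapur" = "bijapur" from by decide,
    show PySem.Str.lower "Chikkamagaluru" = "chikkamagaluru" from by decide,
    show PySem.Str.lower "Chikmagalur" = "chikmagalur" from by decide,
    show PySem.Str.lower "Gulbarga" = "gulbarga" from by decide,
    show PySem.Str.lower "Hyderabad Karnataka" = "hyderabad karnataka" from by decide,
    show PySem.Str.lower "Kalaburagi" = "kalaburagi" from by decide,
    show PySem.Str.lower "Kalaburgi" = "kalaburgi" from by decide,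
    show PySem.Str.lower "Kalyana Karnataka" = "kalyana karnataka" from by decide,
    show PySem.Str.lower "Mysore" = "mysore" from by decide,
    show PySem.Str.lower "Mysuru" = "mysuru" from by decide,
    show PySem.Str.lower "Shimoga" = "shimoga" from by decide,
    show PySem.Str.lower "Shivamogga" = "shivamogga" from by decide,
    show PySem.Str.lower "Tumakuru" = "tumakuru" from by decide,
    show PySem.Str.lower "Tumkur" = "tumkur" from by decide,
    show PySem.Str.lower "Vijayapura" = "vijayapura" from by decide,
    h1, Ne.symm h1, h2, Ne.symm h2, h3, Ne.symm h3, h4, Ne.symm h4, h5, Ne.symm h5, h6, Ne.symm h6, h7, Ne.symm h7, h8, Ne.symm h8, h9, Ne.symm h9, h10, Ne.symm h10, h11, Ne.symm h11, h12, Ne.symm h12, h13, Ne.symm h13, h14, Ne.symm h14, h15, Ne.symm h15, h16, Ne.symm h16, h17, Ne.symm h17, h18, Ne.symm h18, h19, Ne.symm h19, h20, Ne.symm h20, h21, Ne.symm h21, h22, Ne.symm h22, h23, Ne.symm h23, h24, Ne.symm h24, h25, Ne.symm h25]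
  rfl

-- ===== VERDICT (by name: the statement is the Claim_ definition above) =====
theorem india_place_variants_spec : Claim_equal_india_place_variants := by
  intro name _
  unfold Spec_india_place_variants india_place_variants india_place_variants_alt
  by_cases h : name == ""
  · simp [h]
  · simp only [h, if_false, Bool.false_eq_true]
    rw [pv_scan_eq (PySem.Str.lower (PySem.Str.strip name))
      (fun v n => PySem.Set.update v [n, pvTitle n, PySem.Str.upper n]),
      pvNb_eq_lookup]
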